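-- pv_equiv track=rewrite | github.com/Khrustalion/1-semester | A&DS/lab1/problem9.py | stock_up
-- ===== SOURCE A (Python) =====
-- def stock_up(s):
--     s = bin(s)[2:]
--     cnt = 0
--     for i in range(len(s)-1):
--         if s[i] != s[i+1]:
--             cnt += 1
--         elif cnt > 2:
--             return False
--     return cnt == 2
-- ===== SOURCE B (Python) =====
-- def stock_up(s):
--     b = bin(s)[2:]
--     # peel the three maximal runs that a "exactly two transitions" string must have
--     for _ in range(3):
--         if not b:
--             return False
--         b = b.lstrip(b[0])
--     return not b
-- ===== Notes on version B (the rewrite author's own statement) =====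
-- stated objective: idiomatic
-- what changed: B replaces A's index loop counting adjacent transitions (with an early-exit branch) by peeling the leading maximal run of bin(s)[2:] three times with lstrip and checking the string is then exhausted (exactly 3 runs = exactly 2 transitions).
import Mathlib
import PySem

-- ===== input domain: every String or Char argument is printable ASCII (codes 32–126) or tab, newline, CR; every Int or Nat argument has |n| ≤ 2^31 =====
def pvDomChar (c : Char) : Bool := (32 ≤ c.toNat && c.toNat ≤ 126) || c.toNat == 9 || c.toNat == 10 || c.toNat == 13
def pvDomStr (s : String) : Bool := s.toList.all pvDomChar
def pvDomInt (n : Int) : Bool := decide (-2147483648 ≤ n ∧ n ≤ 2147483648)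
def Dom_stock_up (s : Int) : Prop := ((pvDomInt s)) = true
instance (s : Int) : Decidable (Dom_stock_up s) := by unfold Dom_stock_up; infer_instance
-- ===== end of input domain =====

-- B peels the three maximal runs of bin(s)[2:] instead of counting adjacent transitions; idiomatic run-decomposition, same O(n) cost.


-- ===== PORT A =====
-- the for-loop over range(len(s)-1): compares s[i] with s[i+1], so it walks adjacent pairs;
-- cnt is a Python int (Int), early `return False` is the second branch.
def stockA_loop : List Char → Int → Bool
  | c1 :: c2 :: rest, cnt =>
      if c1 ≠ c2 then stockA_loop (c2 :: rest) (cnt + 1)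
      else if cnt > 2 then false
      else stockA_loop (c2 :: rest) cnt
  | _, cnt => cnt == 2

def stock_up (s : Int) : Bool :=
  -- s = bin(s)[2:]  (string slice, taken on the character list — exact)
  let b := PySem.List.slice (PySem.Int.pyBin s).toList (some 2) none
  stockA_loop b 0

-- ===== PORT B =====
-- b.lstrip(b[0]) with b nonempty drops the leading run of b's first character — exact
def peelB : Nat → List Char → Bool
  | 0, b => b.isEmpty
  | n + 1, b =>
      match b with
      | [] => false
      | c :: rest => peelB n ((c :: rest).dropWhile (· == c))

def stock_up_alt (s : Int) : Bool :=
  let b := PySem.List.slice (PySem.Int.pyBin s).toList (some 2) none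
  peelB 3 b

-- ===== PRECONDITION & SPEC =====
def Spec_stock_up (s : Int) (out : Bool) : Prop := out = stock_up_alt s
instance (s : Int) (out : Bool) : Decidable (Spec_stock_up s out) := by unfold Spec_stock_up; infer_instance

-- ===== CLAIM (what is proved, stated in full; the proofs are below) =====
def Claim_equal_stock_up : Prop := ∀ (s : Int), Dom_stock_up s → Spec_stock_up s (stock_up s)

-- ===== LEMMAS AND PROOFS =====

/-- number of adjacent transitions of a character list -/
def transitions : List Char → Nat
  | c1 :: c2 :: rest => (if c1 ≠ c2 then 1 else 0) + transitions (c2 :: rest)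
  | _ => 0

lemma transitions_nil : transitions [] = 0 := rfl

lemma transitions_single (c : Char) : transitions [c] = 0 := rfl

lemma beq_int_decide (a b : Int) : (a == b) = decide (a = b) := by
  cases h : a == b
  · simp_all
  · simp_all

lemma loopA_eq : ∀ (l : List Char) (cnt : Int),
    stockA_loop l cnt = decide (cnt + (transitions l : Int) = 2) := by
  intro l
  induction l with
  | nil => intro cnt; simp [stockA_loop, transitions_nil, beq_int_decide]
  | cons c rest ih =>
    intro cnt
    cases rest with
    | nil => simp [stockA_loop, transitions_single, beq_int_decide]
    | cons c2 r =>
      by_cases h : c = c2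
      · subst h
        have hstep : stockA_loop (c :: c :: r) cnt =
            if cnt > 2 then false else stockA_loop (c :: r) cnt := by
          simp [stockA_loop]
        have htr : transitions (c :: c :: r) = transitions (c :: r) := by
          simp [transitions]
        rw [hstep, htr]
        split_ifs with hc
        · have hne : ¬ (cnt + (transitions (c :: r) : Int) = 2) := by omega
          simp [hne]
        · exact ih cnt
      · have hstep : stockA_loop (c :: c2 :: r) cnt = stockA_loop (c2 :: r) (cnt + 1) := by
          simp [stockA_loop, h]
        have htr : transitions (c :: c2 :: r) = 1 + transitions (c2 :: r) := by
          simp [transitions, h]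
        rw [hstep, htr, ih (cnt + 1), decide_eq_decide]
        push_cast
        omega

lemma trans_dropRun : ∀ (rest : List Char) (c : Char),
    transitions (c :: rest) =
      (if rest.dropWhile (· == c) = [] then 0 else 1 + transitions (rest.dropWhile (· == c))) := by
  intro rest
  induction rest with
  | nil => intro c; simp [transitions]
  | cons c2 r ih =>
    intro c
    by_cases h : c2 = c
    · subst h
      have h1 : transitions (c2 :: c2 :: r) = transitions (c2 :: r) := by
        simp [transitions]
      rw [h1, ih c2]
      simp
    · have hne : c ≠ c2 := fun hh => h hh.symm
      have hb : (c2 == c) = false := by simp [h]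
      simp [transitions, hb, hne]

lemma peelB_eq : ∀ (n : Nat) (l : List Char),
    peelB n l = decide (transitions l + (if l.isEmpty then 0 else 1) = n) := by
  intro n
  induction n with
  | zero =>
    intro l
    cases l with
    | nil => simp [peelB, transitions_nil]
    | cons c rest => simp [peelB]
  | succ n ih =>
    intro l
    cases l with
    | nil => simp [peelB, transitions_nil]
    | cons c rest =>
      simp only [peelB, List.dropWhile_cons, BEq.rfl, if_true]
      rw [ih, decide_eq_decide, trans_dropRun rest c]
      rcases hd : rest.dropWhile (· == c) with _ | ⟨d, ds⟩
      · simp [transitions_nil, eq_comm]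
      · simp
        omega

-- ===== VERDICT (by name: the statement is the Claim_ definition above) =====
theorem stock_up_spec : Claim_equal_stock_up := by
  intro s _
  unfold Spec_stock_up stock_up stock_up_alt
  set b := PySem.List.slice (PySem.Int.pyBin s).toList (some 2) none with hb
  rw [loopA_eq, peelB_eq, decide_eq_decide]
  cases b with
  | nil => simp [transitions_nil]
  | cons c rest => simp; omega
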